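-- pv_equiv track=rewrite | github.com/jack-heinzel/pixelpop | gwpop_nearest_neighbor/utils/nearest_neighbor.py | index_to_coordinate
-- ===== SOURCE A (Python) =====
-- def index_to_coordinate(index, dimension, density):
--     r = []
--     i = index
--     for d in range(dimension):
--         power = density**(dimension-1-d)
--         c = i // power
--         i -= c*power
--         r.append(c)
--     return r
-- ===== SOURCE B (Python) =====
-- def index_to_coordinate(index, dimension, density):
--     if dimension <= 0:
--         return []
--     qs = [index // density ** k for k in range(dimension)]
--     digits = [q - density * qn for q, qn in zip(qs, qs[1:])]
--     digits.append(index // density ** (dimension - 1))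
--     digits.reverse()
--     return digits
-- ===== Notes on version B (the rewrite author's own statement) =====
-- stated objective: alternative
-- what changed: Replaces the stateful loop that keeps a running remainder and divides by per-step recomputed powers with a stateless quotient table (index // density**k for each k) from which every digit is read off as a difference q_k - density*q_{k+1}.
import Mathlib
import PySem

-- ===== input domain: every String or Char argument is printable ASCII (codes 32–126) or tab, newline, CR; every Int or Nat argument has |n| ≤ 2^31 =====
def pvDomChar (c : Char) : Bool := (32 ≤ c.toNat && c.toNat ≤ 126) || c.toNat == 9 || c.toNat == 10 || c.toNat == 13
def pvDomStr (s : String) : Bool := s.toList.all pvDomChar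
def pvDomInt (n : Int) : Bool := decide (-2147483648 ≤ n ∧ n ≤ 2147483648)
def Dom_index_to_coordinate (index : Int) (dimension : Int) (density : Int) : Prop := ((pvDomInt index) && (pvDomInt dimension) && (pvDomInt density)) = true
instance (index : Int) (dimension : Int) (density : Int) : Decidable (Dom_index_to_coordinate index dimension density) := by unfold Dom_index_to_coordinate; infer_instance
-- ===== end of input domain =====

-- B replaces A's stateful remainder loop with a stateless quotient table read off as digit differences (alternative decomposition, same cost).

-- ===== PORT A =====
def index_to_coordinate (index : Int) (dimension : Int) (density : Int) : List Int :=
  ((PySem.List.pyRange 0 dimension 1).foldl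
    (fun (st : Int × List Int) (d : Int) =>
      let power := density ^ (dimension - 1 - d).toNat
      let c := PySem.Int.floordiv st.1 power
      (st.1 - c * power, st.2 ++ [c]))
    (index, [])).2

-- ===== PORT B =====
def index_to_coordinate_alt (index : Int) (dimension : Int) (density : Int) : List Int :=
  if dimension ≤ 0 then []
  else
    let qs := (PySem.List.pyRange 0 dimension 1).map
      (fun k => PySem.Int.floordiv index (density ^ k.toNat))
    let digits := (qs.zip qs.tail).map (fun p => p.1 - density * p.2)
    (digits ++ [PySem.Int.floordiv index (density ^ (dimension - 1).toNat)]).reverse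

-- ===== PRECONDITION & SPEC =====
-- Pre_ excludes exactly the inputs where Python A raises ZeroDivisionError
-- (density = 0 with dimension ≥ 2 makes the divisor density**k zero); B raises the same error there.
def Pre_index_to_coordinate (index : Int) (dimension : Int) (density : Int) : Prop :=
  ¬ (density = 0 ∧ 2 ≤ dimension)
instance (index : Int) (dimension : Int) (density : Int) : Decidable (Pre_index_to_coordinate index dimension density) := by unfold Pre_index_to_coordinate; infer_instance
def pvWitness_index_to_coordinate : Int × Int × Int := (7, 3, 2)

def Spec_index_to_coordinate (index : Int) (dimension : Int) (density : Int) (out : List Int) : Prop := out = index_to_coordinate_alt index dimension density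
instance (index : Int) (dimension : Int) (density : Int) (out : List Int) : Decidable (Spec_index_to_coordinate index dimension density out) := by unfold Spec_index_to_coordinate; infer_instance

-- ===== CLAIM (what is proved, stated in full; the proofs are below) =====
def Claim_equal_index_to_coordinate : Prop := ∀ (index : Int) (dimension : Int) (density : Int), Dom_index_to_coordinate index dimension density → Pre_index_to_coordinate index dimension density → Spec_index_to_coordinate index dimension density (index_to_coordinate index dimension density)

-- ===== LEMMAS AND PROOFS =====

-- quotient table entry: q k = index // density**k
def pvQ (x den : Int) (k : Nat) : Int := PySem.Int.floordiv x (den ^ k)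

-- the digit A and B both emit at position d (n = dimension)
def pvC (x den : Int) (n d : Nat) : Int :=
  if d = 0 then pvQ x den (n - 1) else pvQ x den (n - 1 - d) - den * pvQ x den (n - d)

-- A's running remainder before iteration d
def pvI (x den : Int) (n d : Nat) : Int :=
  if d = 0 then x else x - den ^ (n - d) * pvQ x den (n - d)

theorem pv_step_div (x den : Int) (n d : Nat) (hden : den ≠ 0) (hd : d < n) :
    PySem.Int.floordiv (pvI x den n d) (den ^ (n - 1 - d)) = pvC x den n d := by
  rcases Nat.eq_zero_or_pos d with h0 | hpos
  · subst h0; simp [pvI, pvC, pvQ]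
  · have hd0 : d ≠ 0 := Nat.pos_iff_ne_zero.mp hpos
    have hpow : den ^ (n - d) = den ^ (n - 1 - d) * den := by
      have : n - d = (n - 1 - d) + 1 := by omega
      rw [this, pow_succ]
    have hne : den ^ (n - 1 - d) ≠ 0 := pow_ne_zero _ hden
    unfold pvI pvC
    rw [if_neg hd0, if_neg hd0]
    have hx : x - den ^ (n - d) * pvQ x den (n - d)
        = x + (-(den * pvQ x den (n - d))) * den ^ (n - 1 - d) := by
      rw [hpow]; ring
    rw [hx]
    unfold PySem.Int.floordiv
    rw [Int.add_mul_fdiv_right _ _ hne]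
    unfold pvQ PySem.Int.floordiv
    ring

theorem pv_step_rem (x den : Int) (n d : Nat) (hd : d < n) :
    pvI x den n d - pvC x den n d * den ^ (n - 1 - d) = pvI x den n (d + 1) := by
  rcases Nat.eq_zero_or_pos d with h0 | hpos
  · subst h0
    unfold pvI pvC
    rw [if_pos rfl, if_pos rfl, if_neg (Nat.one_ne_zero), Nat.sub_zero]
    ring
  · have hd0 : d ≠ 0 := Nat.pos_iff_ne_zero.mp hpos
    have hpow : den ^ (n - d) = den ^ (n - 1 - d) * den := by
      have : n - d = (n - 1 - d) + 1 := by omega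
      rw [this, pow_succ]
    have h1 : n - (d + 1) = n - 1 - d := by omega
    unfold pvI pvC
    rw [if_neg hd0, if_neg hd0, if_neg (Nat.succ_ne_zero d), h1, hpow]
    ring

theorem pv_loopA (x den : Int) (n : Nat) (hden : den ≠ 0) :
    ∀ (j a : Nat) (r : List Int), a + j = n →
    (List.range' a j).foldl
      (fun (st : Int × List Int) (k : Nat) =>
        (st.1 - PySem.Int.floordiv st.1 (den ^ (n - 1 - k)) * den ^ (n - 1 - k),
         st.2 ++ [PySem.Int.floordiv st.1 (den ^ (n - 1 - k))]))
      (pvI x den n a, r)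
    = (pvI x den n n, r ++ (List.range' a j).map (pvC x den n)) := by
  intro j
  induction j with
  | zero =>
    intro a r h
    have ha : a = n := by omega
    subst ha; simp
  | succ j ih =>
    intro a r h
    rw [List.range'_succ, List.foldl_cons]
    have ha : a < n := by omega
    rw [pv_step_div x den n a hden ha, pv_step_rem x den n a ha]
    rw [ih (a + 1) (r ++ [pvC x den n a]) (by omega)]
    simp

theorem pv_A_eq (x den : Int) (n : Nat) (hden : den ≠ 0) :
    index_to_coordinate x (↑n) den = (List.range n).map (pvC x den n) := by
  unfold index_to_coordinate
  rw [PySem.List.pyRange_zero_natCast, List.foldl_map]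
  have hf : (fun (st : Int × List Int) (k : Nat) =>
      (st.1 - PySem.Int.floordiv st.1 (den ^ ((↑n : Int) - 1 - ↑k).toNat) * den ^ ((↑n : Int) - 1 - ↑k).toNat,
       st.2 ++ [PySem.Int.floordiv st.1 (den ^ ((↑n : Int) - 1 - ↑k).toNat)]))
      = (fun (st : Int × List Int) (k : Nat) =>
      (st.1 - PySem.Int.floordiv st.1 (den ^ (n - 1 - k)) * den ^ (n - 1 - k),
       st.2 ++ [PySem.Int.floordiv st.1 (den ^ (n - 1 - k))])) := by
    funext st k
    have : ((↑n : Int) - 1 - ↑k).toNat = n - 1 - k := by omega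
    rw [this]
  simp only [hf]
  have h0 : pvI x den n 0 = x := by simp [pvI]
  have hloop := pv_loopA x den n hden n 0 [] (by omega)
  rw [h0] at hloop
  rw [List.range_eq_range', hloop]
  simp

theorem pv_B_eq (x den : Int) (n : Nat) (hn : 1 ≤ n) :
    index_to_coordinate_alt x (↑n) den = (List.range n).map (pvC x den n) := by
  obtain ⟨m, rfl⟩ : ∃ m, n = m + 1 := ⟨n - 1, by omega⟩
  have hnot : ¬ (((m + 1 : Nat) : Int) ≤ 0) := by push_cast; omega
  unfold index_to_coordinate_alt
  rw [if_neg hnot, PySem.List.pyRange_zero_natCast, List.map_map]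
  have hq : ((fun k : Int => PySem.Int.floordiv x (den ^ k.toNat)) ∘ (Nat.cast : Nat → Int))
      = pvQ x den := by
    funext k; simp [pvQ]
  rw [hq]
  have htop : ((((m + 1 : Nat) : Int)) - 1).toNat = m := by omega
  rw [htop]
  have hzip : ((List.range (m + 1)).map (pvQ x den)).zip ((List.range (m + 1)).map (pvQ x den)).tail
      = (List.range m).map (fun j => (pvQ x den j, pvQ x den (j + 1))) := by
    apply List.ext_getElem
    · simp
    · intro i h1 h2
      simp [List.getElem_zip, List.getElem_tail]
  simp only [hzip, List.map_map]
  have hcomp : ((fun p : Int × Int => p.1 - den * p.2) ∘ (fun j => (pvQ x den j, pvQ x den (j + 1))))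
      = fun j => pvQ x den j - den * pvQ x den (j + 1) := rfl
  simp only [hcomp]
  have hrev : ((List.range m).map (fun j => pvQ x den j - den * pvQ x den (j + 1))).reverse
      = (List.range m).map (fun j => pvC x den (m + 1) (j + 1)) := by
    apply List.ext_getElem
    · simp
    · intro i h1 h2
      rw [List.getElem_reverse]
      simp only [List.getElem_map, List.getElem_range, List.length_map, List.length_range]
      have hi : i < m := by simpa using h2
      unfold pvC
      rw [if_neg (Nat.succ_ne_zero i)]
      have e1 : m + 1 - 1 - (i + 1) = m - 1 - i := by omega
      have e2 : m + 1 - (i + 1) = m - 1 - i + 1 := by omega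
      rw [e1, e2]
  rw [List.reverse_append, hrev, List.range_succ_eq_map, List.map_cons, List.map_map]
  have hhead : pvC x den (m + 1) 0 = PySem.Int.floordiv x (den ^ m) := by
    unfold pvC pvQ; rw [if_pos rfl]; norm_num
  simp [hhead, Function.comp_def]

-- ===== VERDICT (by name: the statement is the Claim_ definition above) =====
theorem index_to_coordinate_spec : Claim_equal_index_to_coordinate := by
  intro index dimension density _ hpre
  unfold Spec_index_to_coordinate
  by_cases hle : dimension ≤ 0
  · unfold index_to_coordinate index_to_coordinate_alt
    rw [PySem.List.pyRange_one_eq_nil hle, if_pos hle]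
    rfl
  · have hpos : 0 < dimension := by omega
    obtain ⟨n, rfl⟩ : ∃ n : Nat, dimension = (↑n : Int) :=
      ⟨dimension.toNat, (Int.toNat_of_nonneg (le_of_lt hpos)).symm⟩
    have hn : 1 ≤ n := by exact_mod_cast hpos
    by_cases hden : density = 0
    · have hdim1 : n = 1 := by
        unfold Pre_index_to_coordinate at hpre
        by_contra hne
        exact hpre ⟨hden, by exact_mod_cast (by omega : 2 ≤ n)⟩
      subst hdim1; subst hden
      have hr : PySem.List.pyRange 0 (1:Int) 1 = [0] := by decide
      simp only [Nat.cast_one]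
      simp [index_to_coordinate, index_to_coordinate_alt, hr, PySem.Int.floordiv]
    · rw [pv_A_eq index density n hden, pv_B_eq index density n hn]
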